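-- pv_equiv track=rewrite | github.com/UniversalPropositions/PriMeSRL-Eval | src/conll/conllu_conversion.py | convert_bio
-- ===== SOURCE A (Python) =====
-- def convert_bio(labels):
--     """Convert into BIO format into argument span format.
--
--     :param labels: List of labels in BIO format.
--     :return: Converted format.
--     """
--     n = len(labels)
--     tags = []
--
--     tag = []
--     count = 0
--
--     # B I*
--     for label in labels:
--         count += 1
--
--         if count == n:
--             next_l = None
--         else:
--             next_l = labels[count]
--
--         if label == "O":
--             if tag:
--                 tags.append(tag)
--                 tag = []
--             tags.append([label])
--             continue
--
--         tag.append(label[2:])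
--
--         if not next_l or next_l[0] == "B":
--             tags.append(tag)
--             tag = []
--
--     new_tag = []
--
--     for tag in tags:
--         if len(tag) == 1:
--             if tag[0] == "O":
--                 new_tag.append("*")
--             else:
--                 new_tag.append("(" + tag[0] + "*)")
--             continue
--
--         label = tag[0]
--         n = len(tag)
--
--         for i in range(n):
--             if i == 0:
--                 new_tag.append("(" + label + "*")
--             elif i == n - 1:
--                 new_tag.append("*)")
--             else:
--                 new_tag.append("*")
--
--     return new_tag
-- ===== SOURCE B (Python) =====
-- def convert_bio(labels):
--     """Convert into BIO format into argument span format.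
--
--     :param labels: List of labels in BIO format.
--     :return: Converted format.
--     """
--     nxts = labels[1:] + [None]
--     out = []
--     prev = None
--     for lab, nxt in zip(labels, nxts):
--         if lab == "O":
--             out.append("*")
--         else:
--             start = prev is None or prev == "O" or not lab or lab[0] == "B"
--             end = nxt is None or not nxt or nxt == "O" or nxt[0] == "B"
--             core = "(" + lab[2:] + "*" if start else "*"
--             out.append(core + ")" if end else core)
--         prev = lab
--     return out
-- ===== Notes on version B (the rewrite author's own statement) =====
-- stated objective: simpler
-- what changed: A collects BIO labels into span groups in one pass and then renders each group into bracket tokens in a second pass with an inner index loop; B is a single pass that emits each token directly from its local window (previous label, label, next label).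
-- intended difference: On inputs containing a one-token span whose label suffix is 'O' (e.g. ['B-O']), A renders that position as '*', silently dropping the span because its renderer cannot distinguish a singleton span with role 'O' from an outside-span 'O' label, while B renders '(O*)' as for every other role, which is the intended bracket notation. — e.g. on convert_bio(["B-O"]): A returns ["*"], B returns ["(O*)"]
import Mathlib
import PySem

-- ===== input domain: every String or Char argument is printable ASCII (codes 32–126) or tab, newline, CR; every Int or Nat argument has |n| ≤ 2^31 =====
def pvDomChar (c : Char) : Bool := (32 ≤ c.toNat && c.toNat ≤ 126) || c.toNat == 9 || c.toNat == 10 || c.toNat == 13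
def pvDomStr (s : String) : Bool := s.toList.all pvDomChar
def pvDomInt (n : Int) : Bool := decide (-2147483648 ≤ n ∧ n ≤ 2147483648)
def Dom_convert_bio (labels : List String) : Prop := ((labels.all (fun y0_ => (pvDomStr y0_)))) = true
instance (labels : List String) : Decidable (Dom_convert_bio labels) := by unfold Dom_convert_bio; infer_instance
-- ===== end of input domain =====

-- B replaces A's two-phase grouping (collect spans, then render each span) by one direct pass that
-- emits each bracket token from its local window (prev, label, next): simpler, same O(n) cost.
-- Intended difference: a one-token span whose role suffix is "O" (e.g. "B-O") is rendered "*" by A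
-- (its renderer cannot tell it from an outside-span "O") but "(O*)" by B, the proper span bracket.


-- ===== PORT A =====
-- `not next_l or next_l[0] == "B"` (None and "" are falsy)
def nextCloses : Option String → Bool
  | none => true
  | some s => s = "" || PySem.Str.pyGet? s 0 = some 'B'

-- one iteration of A's first loop; state = (tags, tag, count)
def stepA (labels : List String) (s : List (List String) × List String × Nat) (label : String) :
    List (List String) × List String × Nat :=
  let tags := s.1
  let tag := s.2.1
  let count := s.2.2 + 1
  let next_l : Option String := if count = labels.length then none else some (labels.getD count "")
  if label = "O" then
    ((if tag.isEmpty then tags else tags ++ [tag]) ++ [[label]], [], count)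
  else
    let tag := tag ++ [PySem.Str.slice label (some 2) none]   -- label[2:]
    if nextCloses next_l then (tags ++ [tag], [], count)
    else (tags, tag, count)

-- one iteration of A's second loop (renders one collected span)
def renderStep (new_tag : List String) (tag : List String) : List String :=
  if tag.length = 1 then
    if tag.headD "" = "O" then new_tag ++ ["*"] else new_tag ++ ["(" ++ tag.headD "" ++ "*)"]
  else
    let label := tag.headD ""   -- tag[0]; phase 1 never yields an empty span (Python would raise there)
    let m := tag.length
    (List.range m).foldl
      (fun nt i => if i = 0 then nt ++ ["(" ++ label ++ "*"]
                   else if i = m - 1 then nt ++ ["*)"] else nt ++ ["*"]) new_tag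

def convert_bio (labels : List String) : List String :=
  ((labels.foldl (stepA labels) ([], [], 0)).1).foldl renderStep []

-- ===== PORT B =====
def isStartB (prev : Option String) (lab : String) : Bool :=
  prev = none || prev = some "O" || lab = "" || PySem.Str.pyGet? lab 0 = some 'B'

def isEndB : Option String → Bool
  | none => true
  | some s => s = "" || s = "O" || PySem.Str.pyGet? s 0 = some 'B'

-- one iteration of B's single loop; state = (out, prev), input = (lab, nxt)
def stepB (s : List String × Option String) (p : String × Option String) :
    List String × Option String :=
  let out := s.1
  let prev := s.2
  let lab := p.1
  let nxt := p.2
  if lab = "O" then (out ++ ["*"], some lab)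
  else
    let core := if isStartB prev lab then "(" ++ PySem.Str.slice lab (some 2) none ++ "*" else "*"
    (out ++ [if isEndB nxt then core ++ ")" else core], some lab)

def convert_bio_alt (labels : List String) : List String :=
  let nxts : List (Option String) := (PySem.List.slice labels (some 1) none).map some ++ [none]
  ((labels.zip nxts).foldl stepB ([], none)).1

-- ===== PRECONDITION & SPEC =====
-- On inputs containing a one-token span whose label suffix is "O" (e.g. ["B-O"]), A renders that
-- position as "*", silently dropping the span (its renderer cannot distinguish a singleton span with
-- role "O" from an outside-span "O" label), while B renders "(O*)" as for every other role, which is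
-- the intended bracket notation.
def D_convert_bio (labels : List String) : Prop :=
  ∃ i, ∃ _ : i < labels.length,
    (labels.getD i "").toList.drop 2 = ['O'] ∧
    (i = 0 ∨ labels.getD (i - 1) "" = "O" ∨ (labels.getD i "").toList.head? = some 'B') ∧
    (i + 1 = labels.length ∨ labels.getD (i + 1) "" ∈ ["", "O"] ∨
      (labels.getD (i + 1) "").toList.head? = some 'B')
instance (labels : List String) : Decidable (D_convert_bio labels) := by
  unfold D_convert_bio; infer_instance

def Spec_convert_bio (labels : List String) (out : List String) : Prop :=
  ¬ D_convert_bio labels → out = convert_bio_alt labels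
instance (labels : List String) (out : List String) : Decidable (Spec_convert_bio labels out) := by
  unfold Spec_convert_bio; infer_instance

def pvDiffWitness_convert_bio : List String := ["B-O"]
def pvDiffWitnessOut_convert_bio : (List String) × (List String) := (["*"], ["(O*)"])

-- ===== CLAIM (what is proved, stated in full; the proofs are below) =====
def Claim_unchanged_convert_bio : Prop :=
  ∀ (labels : List String), Dom_convert_bio labels → Spec_convert_bio labels (convert_bio labels)
def Claim_changed_convert_bio : Prop :=
  Dom_convert_bio (pvDiffWitness_convert_bio) ∧ D_convert_bio (pvDiffWitness_convert_bio) ∧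
  convert_bio (pvDiffWitness_convert_bio) = pvDiffWitnessOut_convert_bio.1 ∧
  convert_bio_alt (pvDiffWitness_convert_bio) = pvDiffWitnessOut_convert_bio.2 ∧
  pvDiffWitnessOut_convert_bio.1 ≠ pvDiffWitnessOut_convert_bio.2
def Claim_exact_convert_bio : Prop :=
  ∀ (labels : List String), Dom_convert_bio labels → D_convert_bio labels →
    convert_bio labels ≠ convert_bio_alt labels

-- ===== LEMMAS AND PROOFS =====

-- label[2:]
def sfx (l : String) : String := PySem.Str.slice l (some 2) none

-- the token B emits at one position
def tokB (prev : Option String) (lab : String) (nxt : Option String) : String :=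
  if lab = "O" then "*"
  else
    let core := if isStartB prev lab then "(" ++ sfx lab ++ "*" else "*"
    if isEndB nxt then core ++ ")" else core

-- B's output as a right recursion
def specR (prev : Option String) : List String → List String
  | [] => []
  | l :: ls => tokB prev l ls.head? :: specR (some l) ls

-- the token A's two phases amount to at one position (differs from tokB only when the
-- position is a one-token span whose suffix is "O")
def tokA (prev : Option String) (lab : String) (nxt : Option String) : String :=
  if lab = "O" then "*"
  else if isStartB prev lab then
    (if isEndB nxt then (if sfx lab = "O" then "*" else "(" ++ sfx lab ++ "*)")
     else "(" ++ sfx lab ++ "*")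
  else (if isEndB nxt then "*)" else "*")

-- A's output as a right recursion
def specA (prev : Option String) : List String → List String
  | [] => []
  | l :: ls => tokA prev l ls.head? :: specA (some l) ls

-- the spans A's first loop collects, as a recursion on the suffix (pending span `tag`)
def G : List String → List String → List (List String)
  | _, [] => []
  | tag, l :: ls =>
    if l = "O" then (if tag.isEmpty then [] else [tag]) ++ [[l]] ++ G [] ls
    else if nextCloses ls.head? then [tag ++ [sfx l]] ++ G [] ls
    else G (tag ++ [sfx l]) ls

-- what A's second loop makes of one span
def renderSpec : List String → List String
  | [] => []
  | [s] => if s = "O" then ["*"] else ["(" ++ s ++ "*)"]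
  | s :: _ :: rest => ("(" ++ s ++ "*") :: (List.replicate (rest.length + 1 - 1) "*" ++ ["*)"])

-- a one-token span with suffix "O": the window on which A and B disagree
def W (prev : Option String) (l : String) (nxt : Option String) : Prop :=
  l ≠ "O" ∧ sfx l = "O" ∧ isStartB prev l = true ∧ isEndB nxt = true

def Bad : Option String → List String → Prop
  | _, [] => False
  | prev, l :: ls => W prev l ls.head? ∨ Bad (some l) ls

-- tokens already emitted by B for the prefix of the pending span
def midTok (tag : List String) : List String :=
  ("(" ++ tag.headD "" ++ "*") :: List.replicate (tag.length - 1) "*"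

def pastTok : List String → List String → List String
  | [], _ => []
  | _, [] => []
  | t, l :: _ => if l = "O" then renderSpec t else midTok t

def InvG (tag : List String) (prev : Option String) (ls : List String) : Prop :=
  (tag = [] → prev = none ∨ prev = some "O" ∨
      (∀ l, ls.head? = some l → l = "" ∨ PySem.Str.pyGet? l 0 = some 'B')) ∧
  (tag ≠ [] → ls ≠ [] ∧ (∃ p, prev = some p ∧ p ≠ "O") ∧
      (∀ l, ls.head? = some l → l ≠ "" ∧ PySem.Str.pyGet? l 0 ≠ some 'B'))

theorem phase1_eq (labels : List String) :
    ∀ (ls : List String) (i : Nat) (tags : List (List String)) (tag : List String),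
      labels.drop i = ls →
      (ls.foldl (stepA labels) (tags, tag, i)).1 = tags ++ G tag ls := by
  intro ls
  induction ls with
  | nil => intro i tags tag _; simp [G]
  | cons l ls ih =>
    intro i tags tag hdrop
    have hi : i < labels.length := by
      by_contra h
      push Not at h
      rw [List.drop_eq_nil_of_le h] at hdrop
      cases hdrop
    have hdrop' : labels.drop (i + 1) = ls := by
      rw [← List.tail_drop, hdrop]
      rfl
    have hnext : (if i + 1 = labels.length then none else some (labels.getD (i + 1) "")) =
        ls.head? := by
      cases ls with
      | nil =>
        have hle : labels.length ≤ i + 1 := List.drop_eq_nil_iff.mp hdrop'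
        have : i + 1 = labels.length := by omega
        simp [this]
      | cons x xs =>
        have hx : labels[i + 1]? = some x := by rw [← List.head?_drop, hdrop']; rfl
        have hlt : i + 1 < labels.length := by
          have := List.getElem?_eq_some_iff.mp hx
          exact this.1
        simp [List.getD_eq_getElem?_getD, hx, show ¬(i + 1 = labels.length) from by omega]
    have hstep : stepA labels (tags, tag, i) l =
        (if l = "O" then ((if tag.isEmpty then tags else tags ++ [tag]) ++ [[l]], ([] : List String), i + 1)
         else if nextCloses ls.head? then (tags ++ [tag ++ [sfx l]], [], i + 1)
         else (tags, tag ++ [sfx l], i + 1)) := by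
      simp only [stepA, sfx]
      rw [hnext]
    rw [List.foldl_cons, hstep]
    by_cases h1 : l = "O"
    · subst h1
      rw [if_pos rfl, ih (i + 1) _ _ hdrop']
      cases tag <;> simp [G]
    · rw [if_neg h1]
      by_cases h2 : nextCloses ls.head? = true
      · rw [if_pos h2, ih (i + 1) _ _ hdrop']
        simp [G, h1, h2]
      · rw [if_neg h2, ih (i + 1) _ _ hdrop']
        simp [G, h1, h2]

theorem fold_tok (a b c : String) (m : Nat) (xs : List Nat) :
    ∀ (acc : List String),
      xs.foldl (fun nt i => if i = 0 then nt ++ [a] else if i = m - 1 then nt ++ [b] else nt ++ [c]) acc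
        = acc ++ xs.map (fun i => if i = 0 then a else if i = m - 1 then b else c) := by
  induction xs with
  | nil => intro acc; simp
  | cons x xs ih =>
    intro acc
    rw [List.foldl_cons, List.map_cons]
    split_ifs <;> rw [ih] <;> simp

theorem map_range_tok (a b c : String) (k : Nat) :
    (List.range (k + 2)).map (fun i => if i = 0 then a else if i = (k + 2) - 1 then b else c)
      = a :: (List.replicate k c ++ [b]) := by
  rw [List.range_succ_eq_map]
  simp only [List.map_cons, List.map_map, if_true]
  congr 1
  have h1 : (List.range (k + 1)).map
      ((fun i => if i = 0 then a else if i = k + 2 - 1 then b else c) ∘ Nat.succ)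
      = (List.range (k + 1)).map (fun i => if i = k then b else c) := by
    apply List.map_congr_left
    intro i _
    simp only [Function.comp]
    rw [if_neg (Nat.succ_ne_zero i)]
    by_cases h : i = k
    · simp [h]
    · rw [if_neg (by omega), if_neg h]
  rw [h1, List.range_succ, List.map_append]
  have h2 : (List.range k).map (fun i => if i = k then b else c) = List.replicate k c := by
    rw [show (List.replicate k c : List String) = (List.range k).map (fun _ => c) by
      simp [List.map_const']]
    apply List.map_congr_left
    intro i hi
    rw [if_neg (by simp at hi; omega)]
  rw [h2]
  simp

theorem renderStep_eq (acc : List String) (g : List String) :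
    renderStep acc g = acc ++ renderSpec g := by
  match g with
  | [] => simp [renderStep, renderSpec]
  | [s] => simp [renderStep, renderSpec]; split_ifs <;> rfl
  | s :: x :: rest =>
    have hm : (s :: x :: rest).length = rest.length + 2 := by simp
    rw [renderStep]
    rw [if_neg (by simp)]
    simp only [List.headD_cons, hm]
    rw [fold_tok ("(" ++ s ++ "*") "*)" "*" (rest.length + 2) (List.range (rest.length + 2)) acc]
    rw [map_range_tok]
    simp [renderSpec]

theorem phase2_eq (gs : List (List String)) (acc : List String) :
    gs.foldl renderStep acc = acc ++ gs.flatMap renderSpec := by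
  induction gs generalizing acc with
  | nil => simp
  | cons g gs ih =>
    rw [List.foldl_cons, renderStep_eq, ih]
    simp

theorem stepB_eq (s : List String × Option String) (p : String × Option String) :
    stepB s p = (s.1 ++ [tokB s.2 p.1 p.2], some p.1) := by
  simp only [stepB, tokB, sfx]; split_ifs <;> rfl

theorem foldB (ls : List String) : ∀ (out : List String) (prev : Option String),
    ((ls.zip (ls.tail.map some ++ [none])).foldl stepB (out, prev)).1 = out ++ specR prev ls := by
  induction ls with
  | nil => intro out prev; simp [specR]
  | cons l ls ih =>
    intro out prev
    cases ls with
    | nil =>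
      show ((List.foldl stepB (out, prev) [(l, none)]).1 = _)
      simp [stepB_eq, specR]
    | cons x xs =>
      show ((List.foldl stepB (out, prev) ((l, some x) :: (x :: xs).zip (xs.map some ++ [none]))).1 = _)
      rw [List.foldl_cons, stepB_eq]
      rw [show ((x :: xs).tail.map some ++ [none] : List (Option String)) = xs.map some ++ [none] from rfl] at ih
      rw [ih]
      simp [specR]

theorem altB_eq (labels : List String) : convert_bio_alt labels = specR none labels := by
  unfold convert_bio_alt
  rw [PySem.List.slice_from_one]
  exact foldB labels [] none

theorem renderSpec_long (hd y : String) (t : List String) :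
    renderSpec (hd :: (t ++ [y])) = ("(" ++ hd ++ "*") :: (List.replicate t.length "*" ++ ["*)"]) := by
  cases t with
  | nil => simp [renderSpec]
  | cons a t' => simp [renderSpec]

theorem endB_of_closes (o : Option String) (h : nextCloses o = true) : isEndB o = true := by
  cases o with
  | none => rfl
  | some s =>
    simp only [nextCloses, Bool.or_eq_true, decide_eq_true_eq] at h
    simp only [isEndB, Bool.or_eq_true, decide_eq_true_eq]
    tauto

theorem str_app3 (s : String) : (s ++ "*") ++ ")" = s ++ "*)" := by
  rw [String.append_assoc]; rfl

theorem G_cons (tag : List String) (l : String) (ls : List String) :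
    G tag (l :: ls) = if l = "O" then (if tag.isEmpty then [] else [tag]) ++ [[l]] ++ G [] ls
      else if nextCloses ls.head? then [tag ++ [sfx l]] ++ G [] ls
      else G (tag ++ [sfx l]) ls := rfl

theorem main_eq :
    ∀ (ls tag : List String) (prev : Option String), InvG tag prev ls →
      (G tag ls).flatMap renderSpec = pastTok tag ls ++ specA prev ls := by
  intro ls
  induction ls with
  | nil =>
    intro tag prev hinv
    cases tag with
    | nil => rfl
    | cons h t => exact absurd rfl (hinv.2 (List.cons_ne_nil h t)).1
  | cons l ls IH =>
    intro tag prev hinv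
    by_cases hO : l = "O"
    · subst hO
      have hIH := IH [] (some "O") ⟨fun _ => Or.inr (Or.inl rfl), fun h => absurd rfl h⟩
      cases tag with
      | nil =>
        show (([["O"]] ++ G [] ls).flatMap renderSpec) = _
        rw [List.flatMap_append, hIH]
        simp [renderSpec, pastTok, specA, tokA]
      | cons h t =>
        show ((([h :: t] ++ [["O"]]) ++ G [] ls).flatMap renderSpec) = _
        rw [List.flatMap_append, hIH]
        simp [pastTok, specA, tokA]
        simp [renderSpec]
    · by_cases hc : nextCloses ls.head? = true
      · -- the span closes after l
        have hGS3 : ∀ x, ls.head? = some x → x = "" ∨ PySem.Str.pyGet? x 0 = some 'B' := by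
          intro x hx
          rw [hx] at hc
          simpa [nextCloses] using hc
        have hIH := IH [] (some l) ⟨fun _ => Or.inr (Or.inr hGS3), fun h => absurd rfl h⟩
        have hEnd : isEndB ls.head? = true := endB_of_closes _ hc
        cases tag with
        | nil =>
          have hstart : isStartB prev l = true := by
            simp only [isStartB, Bool.or_eq_true, decide_eq_true_eq]
            rcases hinv.1 rfl with h | h | h
            · tauto
            · tauto
            · rcases h l rfl with h' | h'
              · tauto
              · right; simpa using h'
          rw [show G [] (l :: ls) = [[sfx l]] ++ G [] ls by simp [G, hO, hc]]
          rw [List.flatMap_append, hIH]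
          simp only [List.flatMap_cons, List.flatMap_nil, List.append_nil]
          rw [show pastTok [] ls = [] from rfl, show pastTok [] (l :: ls) = [] from rfl]
          simp only [List.nil_append, specA, renderSpec, tokA, if_neg hO, hstart, hEnd]
          by_cases hs : sfx l = "O" <;> simp [hs]
        | cons h t =>
          obtain ⟨⟨p, hp, hpO⟩, hl⟩ := (hinv.2 (List.cons_ne_nil h t)).2
          obtain ⟨hl1, hl2⟩ := hl l rfl
          have hstart : isStartB prev l = false := by
            rw [Bool.eq_false_iff]
            simp only [ne_eq, isStartB, Bool.or_eq_true, decide_eq_true_eq]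
            rintro (((h | h) | h) | h)
            · rw [hp] at h; cases h
            · rw [hp] at h; exact hpO (by injection h)
            · exact hl1 h
            · exact hl2 (by simpa using h)
          rw [show G (h :: t) (l :: ls) = [(h :: t) ++ [sfx l]] ++ G [] ls by simp [G, hO, hc]]
          rw [List.flatMap_append, hIH]
          simp only [List.flatMap_cons, List.flatMap_nil, List.append_nil, List.cons_append]
          rw [renderSpec_long, show pastTok [] ls = [] from rfl]
          rw [show pastTok (h :: t) (l :: ls) = midTok (h :: t) by simp [pastTok, hO]]
          simp only [List.nil_append, specA, tokA, if_neg hO, hstart, Bool.false_eq_true,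
            if_false, hEnd, midTok, List.headD_cons, List.length_cons, Nat.add_sub_cancel]
          simp
      · -- the span continues into the next label
        cases ls with
        | nil => exact absurd rfl hc
        | cons x xs =>
          have hx : ¬(x = "" ∨ PySem.Str.pyGet? x 0 = some 'B') := by
            intro h
            refine hc ?_
            simp only [List.head?_cons, nextCloses, Bool.or_eq_true, decide_eq_true_eq]
            exact h
          obtain ⟨hx1, hx2⟩ := not_or.mp hx
          have hcf : ¬ nextCloses (x :: xs).head? = true := hc
          have inv' : InvG (tag ++ [sfx l]) (some l) (x :: xs) := by
            refine ⟨fun h => absurd h (by simp), fun _ => ⟨List.cons_ne_nil x xs, ⟨l, rfl, hO⟩, ?_⟩⟩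
            intro y hy
            injection hy with hy
            subst hy
            exact ⟨hx1, hx2⟩
          have hIH := IH (tag ++ [sfx l]) (some l) inv'
          rw [show G tag (l :: x :: xs) = G (tag ++ [sfx l]) (x :: xs) by
            rw [G_cons, if_neg hO, if_neg hcf]]
          rw [hIH]
          suffices hpt : pastTok (tag ++ [sfx l]) (x :: xs)
              = pastTok tag (l :: x :: xs) ++ [tokA prev l (some x)] by
            rw [hpt]
            simp [specA]
          cases tag with
          | nil =>
            have hstart : isStartB prev l = true := by
              simp only [isStartB, Bool.or_eq_true, decide_eq_true_eq]
              rcases hinv.1 rfl with h | h | h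
              · tauto
              · tauto
              · rcases h l rfl with h' | h'
                · tauto
                · right; simpa using h'
            by_cases hxO : x = "O"
            · have hEnd : isEndB (some x) = true := by simp [isEndB, hxO]
              rw [show pastTok ([] ++ [sfx l]) (x :: xs) = renderSpec [sfx l] by
                simp [pastTok, hxO]]
              rw [show pastTok [] (l :: x :: xs) = [] from rfl]
              simp only [renderSpec, tokA, if_neg hO, hstart, hEnd, List.nil_append]
              by_cases hs : sfx l = "O" <;> simp [hs]
            · have hEnd : isEndB (some x) = false := by
                rw [Bool.eq_false_iff]
                simp only [ne_eq, isEndB, Bool.or_eq_true, decide_eq_true_eq]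
                rintro ((h | h) | h)
                · exact hx1 h
                · exact hxO h
                · exact hx2 (by simpa using h)
              rw [show pastTok ([] ++ [sfx l]) (x :: xs) = midTok [sfx l] by
                simp [pastTok, hxO]]
              rw [show pastTok [] (l :: x :: xs) = [] from rfl]
              simp [midTok, tokA, hO, hstart, hEnd]
          | cons h t =>
            obtain ⟨⟨p, hp, hpO⟩, hl⟩ := (hinv.2 (List.cons_ne_nil h t)).2
            obtain ⟨hl1, hl2⟩ := hl l rfl
            have hstart : isStartB prev l = false := by
              rw [Bool.eq_false_iff]
              simp only [ne_eq, isStartB, Bool.or_eq_true, decide_eq_true_eq]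
              rintro (((h | h) | h) | h)
              · rw [hp] at h; cases h
              · rw [hp] at h; exact hpO (by injection h)
              · exact hl1 h
              · exact hl2 (by simpa using h)
            rw [show pastTok (h :: t) (l :: x :: xs) = midTok (h :: t) by simp [pastTok, hO]]
            by_cases hxO : x = "O"
            · rw [show pastTok ((h :: t) ++ [sfx l]) (x :: xs) = renderSpec (h :: (t ++ [sfx l]))
                by simp [pastTok, hxO]]
              rw [renderSpec_long]
              simp [midTok, tokA, hO, hstart, isEndB, hxO]
            · have hEnd : isEndB (some x) = false := by
                rw [Bool.eq_false_iff]
                simp only [ne_eq, isEndB, Bool.or_eq_true, decide_eq_true_eq]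
                rintro ((hq | hq) | hq)
                · exact hx1 hq
                · exact hxO hq
                · exact hx2 (by simpa using hq)
              rw [show pastTok ((h :: t) ++ [sfx l]) (x :: xs) = midTok (h :: (t ++ [sfx l]))
                by simp [pastTok, hxO]]
              simp [midTok, tokA, hO, hstart, hEnd, List.replicate_succ']

theorem spec_eq : ∀ (ls : List String) (prev : Option String),
    ¬ Bad prev ls → specA prev ls = specR prev ls := by
  intro ls
  induction ls with
  | nil => intro prev _; rfl
  | cons l ls IH =>
    intro prev hbad
    have hbad' : ¬ Bad (some l) ls := fun h => hbad (Or.inr h)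
    have hW : ¬ W prev l ls.head? := fun h => hbad (Or.inl h)
    show tokA prev l ls.head? :: specA (some l) ls = tokB prev l ls.head? :: specR (some l) ls
    rw [IH (some l) hbad']
    congr 1
    by_cases hO : l = "O"
    · simp [tokA, tokB, hO]
    · by_cases hstart : isStartB prev l = true
      · by_cases hEnd : isEndB ls.head? = true
        · have hsfx : sfx l ≠ "O" := fun hq => hW ⟨hO, hq, hstart, hEnd⟩
          simp only [tokA, tokB, if_neg hO, hstart, hEnd, if_neg hsfx]
          simp [str_app3]
        · simp [tokA, tokB, hO, hstart, Bool.eq_false_iff.mpr hEnd]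
      · by_cases hEnd : isEndB ls.head? = true
        · simp [tokA, tokB, hO, Bool.eq_false_iff.mpr hstart, hEnd]
        · simp [tokA, tokB, hO, Bool.eq_false_iff.mpr hstart, Bool.eq_false_iff.mpr hEnd]

theorem bad_imp_D :
    ∀ (ls pre : List String) (prev : Option String),
      ((pre = [] ∧ prev = none) ∨ (∃ p pr, pre = pr ++ [p] ∧ prev = some p)) →
      Bad prev ls → D_convert_bio (pre ++ ls) := by
  intro ls
  induction ls with
  | nil => intro pre prev _ hb; cases hb
  | cons l ls IH =>
    intro pre prev hpre hb
    cases hb with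
    | inr hb =>
      have := IH (pre ++ [l]) (some l) (Or.inr ⟨l, pre, rfl, rfl⟩) hb
      rwa [List.append_assoc, List.singleton_append] at this
    | inl hw =>
      obtain ⟨hlO, hsfx, hstart, hend⟩ := hw
      have hlne : l ≠ "" := by
        intro h
        rw [h] at hsfx
        exact absurd hsfx (by decide)
      have hgetl : (pre ++ l :: ls).getD pre.length "" = l := by
        rw [List.getD_eq_getElem?_getD, List.getElem?_append_right (le_refl pre.length),
          Nat.sub_self]
        rfl
      refine ⟨pre.length, by simp, ?_, ?_, ?_⟩
      · rw [hgetl]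
        have h2 : (sfx l).toList = l.toList.drop 2 := by simp [sfx, pysem]
        rw [← h2, hsfx]
        rfl
      · -- start disjunction
        simp only [isStartB, Bool.or_eq_true, decide_eq_true_eq] at hstart
        rcases hstart with ((h | h) | h) | h
        · -- prev = none
          rcases hpre with ⟨hpe, _⟩ | ⟨p, pr, hpe, hps⟩
          · exact Or.inl (by simp [hpe])
          · rw [hps] at h; cases h
        · -- prev = some "O"
          rcases hpre with ⟨_, hps⟩ | ⟨p, pr, hpe, hps⟩
          · rw [hps] at h; cases h
          · have hpO : p = "O" := by rw [hps] at h; injection h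
            refine Or.inr (Or.inl ?_)
            subst hpe hpO
            rw [List.getD_eq_getElem?_getD]
            rw [show pr ++ ["O"] ++ l :: ls = pr ++ ("O" :: l :: ls) by simp]
            rw [show (pr ++ ["O"]).length - 1 = pr.length by simp]
            rw [List.getElem?_append_right (le_refl pr.length), Nat.sub_self]
            rfl
        · exact absurd h hlne
        · refine Or.inr (Or.inr ?_)
          rw [hgetl]
          simpa [pysem, List.head?_eq_getElem?] using h
      · -- end disjunction
        cases ls with
        | nil => exact Or.inl (by simp)
        | cons x xs =>
          have hgx : (pre ++ l :: x :: xs).getD (pre.length + 1) "" = x := by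
            rw [List.getD_eq_getElem?_getD,
              List.getElem?_append_right (Nat.le_succ_of_le (le_refl pre.length))]
            rw [show pre.length.succ - pre.length = 1 by omega]
            rfl
          simp only [List.head?_cons, isEndB, Bool.or_eq_true, decide_eq_true_eq] at hend
          rcases hend with (h | h) | h
          · exact Or.inr (Or.inl (by rw [hgx]; simp [h]))
          · exact Or.inr (Or.inl (by rw [hgx]; simp [h]))
          · refine Or.inr (Or.inr ?_)
            rw [hgx]
            simpa [pysem, List.head?_eq_getElem?] using h

-- conditions of D_convert_bio transported to a suffix, relative to a ghost previous label
def CondT (prev : Option String) (ls : List String) (i : Nat) : Prop :=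
  i < ls.length ∧ (ls.getD i "").toList.drop 2 = ['O'] ∧
  ((i = 0 ∧ isStartB prev (ls.getD 0 "") = true) ∨
   (0 < i ∧ (ls.getD (i - 1) "" = "O" ∨ (ls.getD i "").toList.head? = some 'B'))) ∧
  (i + 1 = ls.length ∨ ls.getD (i + 1) "" ∈ ["", "O"] ∨
    (ls.getD (i + 1) "").toList.head? = some 'B')

theorem tight_aux : ∀ (ls : List String) (prev : Option String) (i : Nat), CondT prev ls i →
    (specA prev ls)[i]? = some "*" ∧
    (specR prev ls)[i]? = some (("(" ++ "O" ++ "*") ++ ")") := by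
  intro ls
  induction ls with
  | nil => intro prev i hc; exact absurd hc.1 (by simp)
  | cons l ls IH =>
    intro prev i hc
    obtain ⟨hlen, hd, hstart, hend⟩ := hc
    cases i with
    | zero =>
      rw [List.getD_cons_zero] at hd
      have hst : isStartB prev l = true := by
        rcases hstart with ⟨_, h⟩ | ⟨h, _⟩
        · simpa using h
        · omega
      have hO : l ≠ "O" := by
        intro h
        rw [h] at hd
        exact absurd hd (by decide)
      have hsfx : sfx l = "O" := by
        apply String.toList_inj.mp
        rw [show (sfx l).toList = l.toList.drop 2 by simp [sfx, pysem], hd]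
        rfl
      have hEnd : isEndB ls.head? = true := by
        cases ls with
        | nil => rfl
        | cons x xs =>
          simp only [List.head?_cons, isEndB, Bool.or_eq_true, decide_eq_true_eq]
          rcases hend with h | h | h
          · simp at h
          · simp only [List.getD_cons_succ, List.getD_cons_zero, List.mem_cons,
              List.not_mem_nil, or_false] at h
            tauto
          · simp only [List.getD_cons_succ, List.getD_cons_zero] at h
            right
            simpa [pysem, List.head?_eq_getElem?] using h
      constructor
      · show (tokA prev l ls.head? :: specA (some l) ls)[0]? = some "*"
        simp [tokA, hO, hst, hEnd, hsfx]
      · show (tokB prev l ls.head? :: specR (some l) ls)[0]? = some _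
        simp [tokB, hO, hst, hEnd, hsfx]
    | succ j =>
      have hc' : CondT (some l) ls j := by
        refine ⟨by simp at hlen; omega, by simpa [List.getD_cons_succ] using hd, ?_, ?_⟩
        · rcases hstart with ⟨h0, _⟩ | ⟨_, h⟩
          · exact absurd h0 (Nat.succ_ne_zero j)
          · cases j with
            | zero =>
              refine Or.inl ⟨rfl, ?_⟩
              simp only [Nat.succ_sub_one, List.getD_cons_zero, List.getD_cons_succ] at h
              simp only [isStartB, Bool.or_eq_true, decide_eq_true_eq]
              rcases h with h | h
              · left; left; right; rw [h]
              · right; simpa [pysem, List.head?_eq_getElem?] using h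
            | succ k =>
              refine Or.inr ⟨Nat.succ_pos k, ?_⟩
              simpa [Nat.succ_sub_one, List.getD_cons_succ] using h
        · rcases hend with h | h | h
          · left; simpa using h
          · right; left; simpa [List.getD_cons_succ] using h
          · right; right; simpa [List.getD_cons_succ] using h
      have hIH := IH (some l) j hc'
      exact ⟨by simpa [specA] using hIH.1, by simpa [specR] using hIH.2⟩

theorem A_eq_specA (labels : List String) : convert_bio labels = specA none labels := by
  unfold convert_bio
  rw [phase1_eq labels labels 0 [] [] rfl, phase2_eq]
  have := main_eq labels [] none ⟨fun _ => Or.inl rfl, fun h => absurd rfl h⟩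
  simpa using this

-- ===== VERDICT (by name: the statement is the Claim_ definition above) =====
theorem convert_bio_spec : Claim_unchanged_convert_bio := by
  intro labels _ hnd
  rw [A_eq_specA, altB_eq]
  exact spec_eq labels none
    (fun hb => hnd (bad_imp_D labels [] none (Or.inl ⟨rfl, rfl⟩) (by simpa using hb)))

theorem convert_bio_changed : Claim_changed_convert_bio := by
  unfold Claim_changed_convert_bio; decide

theorem convert_bio_tight : Claim_exact_convert_bio := by
  intro labels _ hD heq
  obtain ⟨i, hlen, hd, hstart, hend⟩ := hD
  have hcond : CondT none labels i := by
    refine ⟨hlen, hd, ?_, hend⟩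
    by_cases hi : i = 0
    · exact Or.inl ⟨hi, by simp [isStartB]⟩
    · refine Or.inr ⟨by omega, ?_⟩
      rcases hstart with h | h | h
      · exact absurd h hi
      · exact Or.inl h
      · exact Or.inr h
  obtain ⟨hA, hB⟩ := tight_aux labels none i hcond
  rw [A_eq_specA, altB_eq] at heq
  rw [heq, hB] at hA
  exact absurd (Option.some.inj hA) (by decide)
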